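-- pv_equiv track=rewrite | github.com/katop1234/SieveInterview | SieveInterview/helpers.py | sq_dist_between_two_vectors
-- ===== SOURCE A (Python) =====
-- def sq_dist_between_two_vectors(a, b):
--     '''returns the squared distance between two vectors'''
--     val = 0
--     for i in range(min(len(a), len(b))):
--         val += (a[i] - b[i]) ** 2
--     if len(a) < len(b):
--         val += sum([b[i]**2 for i in range(len(a), len(b))])
--     else:
--         val += sum([a[i] ** 2 for i in range(len(b), len(a))])
--     return val
-- ===== SOURCE B (Python) =====
-- def sq_dist_between_two_vectors(a, b):
--     '''returns the squared distance between two vectors'''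
--     total = 0
--     for i in range(max(len(a), len(b))):
--         x = a[i] if i < len(a) else 0
--         y = b[i] if i < len(b) else 0
--         total += (x - y) ** 2
--     return total
-- ===== Notes on version B (the rewrite author's own statement) =====
-- stated objective: simpler
-- what changed: Replaces A's common-prefix loop plus length-comparison branch with two separate tail sums by a single uniform loop over max(len(a), len(b)) that pads the shorter vector with zeros.
import Mathlib
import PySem

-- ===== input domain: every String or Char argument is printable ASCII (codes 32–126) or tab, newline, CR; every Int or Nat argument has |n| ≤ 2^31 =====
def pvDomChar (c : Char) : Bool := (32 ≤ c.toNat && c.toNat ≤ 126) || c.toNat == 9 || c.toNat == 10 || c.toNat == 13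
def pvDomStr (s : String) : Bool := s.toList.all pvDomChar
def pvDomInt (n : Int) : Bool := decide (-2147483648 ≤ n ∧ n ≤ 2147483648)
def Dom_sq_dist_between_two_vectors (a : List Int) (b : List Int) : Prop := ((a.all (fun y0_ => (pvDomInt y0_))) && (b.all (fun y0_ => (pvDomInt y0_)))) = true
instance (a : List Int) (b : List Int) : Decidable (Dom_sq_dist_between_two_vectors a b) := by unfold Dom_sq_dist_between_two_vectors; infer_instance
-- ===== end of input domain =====

-- B replaces A's common-prefix loop plus length-branch with two tail sums by one
-- uniform zero-padded loop over max(len(a), len(b)); objective: simpler.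

-- ===== PORT A =====
def sq_dist_between_two_vectors (a : List Int) (b : List Int) : Int :=
  let val : Int :=
    (PySem.List.pyRange 0 (min (a.length : Int) (b.length : Int)) 1).foldl
      (fun val i => val + (PySem.List.pyGetD a i 0 - PySem.List.pyGetD b i 0) ^ 2) 0
  if (a.length : Int) < (b.length : Int) then
    val + ((PySem.List.pyRange (a.length : Int) (b.length : Int) 1).map
      (fun i => (PySem.List.pyGetD b i 0) ^ 2)).sum
  else
    val + ((PySem.List.pyRange (b.length : Int) (a.length : Int) 1).map
      (fun i => (PySem.List.pyGetD a i 0) ^ 2)).sum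

-- ===== PORT B =====
def sq_dist_between_two_vectors_alt (a : List Int) (b : List Int) : Int :=
  (PySem.List.pyRange 0 (max (a.length : Int) (b.length : Int)) 1).foldl
    (fun total i =>
      let x : Int := if i < (a.length : Int) then PySem.List.pyGetD a i 0 else 0
      let y : Int := if i < (b.length : Int) then PySem.List.pyGetD b i 0 else 0
      total + (x - y) ^ 2) 0

-- ===== PRECONDITION & SPEC =====
def Spec_sq_dist_between_two_vectors (a : List Int) (b : List Int) (out : Int) : Prop := out = sq_dist_between_two_vectors_alt a b
instance (a : List Int) (b : List Int) (out : Int) : Decidable (Spec_sq_dist_between_two_vectors a b out) := by unfold Spec_sq_dist_between_two_vectors; infer_instance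

-- ===== CLAIM (what is proved, stated in full; the proofs are below) =====
def Claim_equal_sq_dist_between_two_vectors : Prop := ∀ (a : List Int) (b : List Int), Dom_sq_dist_between_two_vectors a b → Spec_sq_dist_between_two_vectors a b (sq_dist_between_two_vectors a b)

-- ===== LEMMAS AND PROOFS =====

theorem sq_dist_eq (a b : List Int) :
    sq_dist_between_two_vectors a b = sq_dist_between_two_vectors_alt a b := by
  unfold sq_dist_between_two_vectors sq_dist_between_two_vectors_alt
  set n : Int := (a.length : Int) with hn
  set m : Int := (b.length : Int) with hm
  have h0n : (0:Int) ≤ n := by simp [hn]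
  have h0m : (0:Int) ≤ m := by simp [hm]
  -- rewrite B's fold as sum over the padded range, split at min n m
  rw [PySem.List.foldl_add
        (g := fun i =>
          ((if i < n then PySem.List.pyGetD a i 0 else 0)
            - (if i < m then PySem.List.pyGetD b i 0 else 0)) ^ 2),
      PySem.List.foldl_add
        (g := fun i => (PySem.List.pyGetD a i 0 - PySem.List.pyGetD b i 0) ^ 2)]
  rw [PySem.List.pyRange_one_append 0 (min n m) (max n m)
        (by omega) (by omega),
      List.map_append, List.sum_append]
  have hpref :
      (PySem.List.pyRange 0 (min n m) 1).map
        (fun i =>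
          ((if i < n then PySem.List.pyGetD a i 0 else 0)
            - (if i < m then PySem.List.pyGetD b i 0 else 0)) ^ 2)
      = (PySem.List.pyRange 0 (min n m) 1).map
        (fun i => (PySem.List.pyGetD a i 0 - PySem.List.pyGetD b i 0) ^ 2) := by
    apply List.map_congr_left
    intro i hi
    rw [PySem.List.mem_pyRange_one] at hi
    rw [if_pos (by omega), if_pos (by omega)]
  rw [hpref]
  by_cases h : n < m
  · rw [if_pos h]
    have : min n m = n := by omega
    rw [this]
    have hmax : max n m = m := by omega
    rw [hmax]
    have htail :
        (PySem.List.pyRange n m 1).map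
          (fun i =>
            ((if i < n then PySem.List.pyGetD a i 0 else 0)
              - (if i < m then PySem.List.pyGetD b i 0 else 0)) ^ 2)
        = (PySem.List.pyRange n m 1).map
          (fun i => (PySem.List.pyGetD b i 0) ^ 2) := by
      apply List.map_congr_left
      intro i hi
      rw [PySem.List.mem_pyRange_one] at hi
      rw [if_neg (by omega), if_pos (by omega)]
      ring
    rw [htail]
    ring
  · rw [if_neg h]
    have : min n m = m := by omega
    rw [this]
    have hmax : max n m = n := by omega
    rw [hmax]
    have htail :
        (PySem.List.pyRange m n 1).map
          (fun i =>
            ((if i < n then PySem.List.pyGetD a i 0 else 0)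
              - (if i < m then PySem.List.pyGetD b i 0 else 0)) ^ 2)
        = (PySem.List.pyRange m n 1).map
          (fun i => (PySem.List.pyGetD a i 0) ^ 2) := by
      apply List.map_congr_left
      intro i hi
      rw [PySem.List.mem_pyRange_one] at hi
      rw [if_pos (by omega), if_neg (by omega)]
      ring
    rw [htail]
    ring

-- ===== VERDICT (by name: the statement is the Claim_ definition above) =====
theorem sq_dist_between_two_vectors_spec : Claim_equal_sq_dist_between_two_vectors := by
  intro a b _
  unfold Spec_sq_dist_between_two_vectors
  exact sq_dist_eq a b
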